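-- pv_equiv track=rewrite | github.com/jiaeyan/Jiayan | jiayan/postagger/crf_pos_tagger.py | get_word_pattern
-- ===== SOURCE A (Python) =====
-- from string import ascii_uppercase
--
-- def get_word_pattern(word):
--     pattern = ''
--     char = ''
--     i = -1
--     for ch in word:
--         if ch != char:
--             i += 1
--         pattern += ascii_uppercase[i]
--         char = ch
--     return pattern
-- ===== SOURCE B (Python) =====
-- from string import ascii_uppercase
--
-- def get_word_pattern(word):
--     # group the word into consecutive runs first, then emit one block per run
--     runs = []
--     for ch in word:
--         if runs and runs[-1][0] == ch:
--             runs[-1] = (ch, runs[-1][1] + 1)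
--         else:
--             runs.append((ch, 1))
--     return ''.join(ascii_uppercase[j] * n for j, (_, n) in enumerate(runs))
-- ===== Notes on version B (the rewrite author's own statement) =====
-- stated objective: alternative
-- what changed: B first builds the list of (char, run-length) runs, then emits one letter-block per run with enumerate, instead of A's per-character loop that threads the previous char and a letter index.
import Mathlib
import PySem

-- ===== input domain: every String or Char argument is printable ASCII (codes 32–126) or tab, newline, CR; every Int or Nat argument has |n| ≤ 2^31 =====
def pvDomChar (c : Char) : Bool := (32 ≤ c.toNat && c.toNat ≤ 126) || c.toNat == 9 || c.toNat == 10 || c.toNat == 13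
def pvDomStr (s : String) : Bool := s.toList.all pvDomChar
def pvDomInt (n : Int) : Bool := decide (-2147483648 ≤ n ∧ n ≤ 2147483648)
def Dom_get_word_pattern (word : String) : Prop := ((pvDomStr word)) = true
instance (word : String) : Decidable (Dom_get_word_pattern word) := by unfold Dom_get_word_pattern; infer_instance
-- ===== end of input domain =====

-- B builds the (char, run-length) run list first and emits one letter-block per run,
-- instead of A's per-character loop threading the previous char and a letter index.

-- ascii_uppercase as a list of characters
def pvUpper : List Char := "ABCDEFGHIJKLMNOPQRSTUVWXYZ".toList

-- ===== PORT A =====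
-- A's loop; ascii_uppercase[i] is PySem.List.pyGet? (none = IndexError, threaded out as none)
def goA : List Char → List Char → Option Char → Int → Option (List Char)
  | [], pat, _, _ => some pat
  | ch :: rest, pat, char, i =>
      let i' := if char ≠ some ch then i + 1 else i
      match PySem.List.pyGet? pvUpper i' with
      | none => none
      | some c => goA rest (pat ++ [c]) (some ch) i'

def get_word_pattern (word : String) : String :=
  ((goA word.toList [] none (-1)).map String.ofList).getD ""

-- ===== PORT B =====
-- one step of B's run-building loop: extend the last run or start a new one
def stepB (runs : List (Char × Nat)) (ch : Char) : List (Char × Nat) :=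
  match runs.getLast? with
  | some (c, n) => if c = ch then runs.dropLast ++ [(ch, n + 1)] else runs ++ [(ch, 1)]
  | none => [(ch, 1)]

-- B's join over enumerate(runs): block j is ascii_uppercase[j] * n (none = IndexError, via bind)
def emitB : Nat → List (Char × Nat) → Option (List Char)
  | _, [] => some []
  | j, (_, n) :: rest =>
      (PySem.List.pyGet? pvUpper (j : Int)).bind fun c =>
        (emitB (j + 1) rest).map (fun t => List.replicate n c ++ t)

def get_word_pattern_alt (word : String) : String :=
  ((emitB 0 (word.toList.foldl stepB [])).map String.ofList).getD ""

-- ===== PRECONDITION & SPEC =====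
-- Pre_ excludes exactly the words with more than 26 consecutive-equal runs, on which the
-- Python A (and B) raises IndexError indexing ascii_uppercase.
def Pre_get_word_pattern (word : String) : Prop :=
  (word.toList.zip (word.toList.drop 1)).countP (fun p => p.1 ≠ p.2)
    + (if word.toList = [] then 0 else 1) ≤ 26
instance (word : String) : Decidable (Pre_get_word_pattern word) := by
  unfold Pre_get_word_pattern; infer_instance

def pvWitness_get_word_pattern : String := "hheello, world!"

def Spec_get_word_pattern (word : String) (out : String) : Prop := out = get_word_pattern_alt word
instance (word : String) (out : String) : Decidable (Spec_get_word_pattern word out) := by unfold Spec_get_word_pattern; infer_instance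

-- ===== CLAIM (what is proved, stated in full; the proofs are below) =====
def Claim_equal_get_word_pattern : Prop := ∀ (word : String), Dom_get_word_pattern word → Pre_get_word_pattern word → Spec_get_word_pattern word (get_word_pattern word)

-- ===== LEMMAS AND PROOFS =====

-- A's accumulator factors out
theorem goA_acc (l : List Char) (pat : List Char) (char : Option Char) (i : Int) :
    goA l pat char i = (goA l [] char i).map (fun t => pat ++ t) := by
  induction l generalizing pat char i with
  | nil => simp [goA]
  | cons ch rest ih =>
      simp only [goA]
      cases h : PySem.List.pyGet? pvUpper (if char ≠ some ch then i + 1 else i) with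
      | none => simp
      | some c =>
          dsimp only
          rw [ih (pat ++ [c]), ih ([] ++ [c])]
          cases goA rest [] (some ch) (if char ≠ some ch then i + 1 else i) <;> simp

-- stepB only touches the last run
theorem stepB_front (front : List (Char × Nat)) (c : Char) (n : Nat) (ch : Char) :
    stepB (front ++ [(c, n)]) ch = front ++ stepB [(c, n)] ch := by
  simp [stepB]
  split_ifs <;> simp

theorem foldl_stepB_front (l : List Char) (front : List (Char × Nat)) (c : Char) (n : Nat) :
    l.foldl stepB (front ++ [(c, n)]) = front ++ l.foldl stepB [(c, n)] := by
  induction l generalizing front c n with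
  | nil => simp
  | cons ch rest ih =>
      simp only [List.foldl_cons, stepB_front]
      by_cases h : c = ch
      · simp [stepB, h, ih]
      · have : stepB [(c, n)] ch = [(c, n)] ++ [(ch, 1)] := by simp [stepB, h]
        rw [this, ← List.append_assoc, ih, ih [(c, n)] ch 1]
        simp

-- unfolding goA on a char that differs from the previous one
theorem goA_cons_new (ch : Char) (rest pat : List Char) (char : Option Char) (i : Int)
    (h : char ≠ some ch) :
    goA (ch :: rest) pat char i =
      match PySem.List.pyGet? pvUpper (i + 1) with
      | none => none
      | some c => goA rest (pat ++ [c]) (some ch) (i + 1) := by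
  simp only [goA, if_pos h]

-- main invariant: emitting B's runs from state (c, n) at letter index j equals
-- A's continuation from previous char c and letter index j, prefixed by the pending block
theorem main_inv (l : List Char) (c : Char) (n : Nat) (j : Nat) :
    emitB j (l.foldl stepB [(c, n)]) =
      (PySem.List.pyGet? pvUpper (j : Int)).bind (fun a =>
        (goA l [] (some c) (j : Int)).map (fun t => List.replicate n a ++ t)) := by
  induction l generalizing c n j with
  | nil =>
      simp only [List.foldl_nil, emitB, goA]
  | cons ch rest ih =>
      simp only [List.foldl_cons]
      by_cases h : c = ch
      · have hs : stepB [(c, n)] ch = [(c, n + 1)] := by simp [stepB, h]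
        rw [hs, ih]
        simp only [goA, h]
        simp only [ne_eq, not_true_eq_false, if_false]
        cases hg : PySem.List.pyGet? pvUpper (j : Int) with
        | none => simp
        | some a =>
            simp only [Option.bind_some]
            rw [goA_acc rest ([] ++ [a]) (some ch) (j : Int)]
            cases goA rest [] (some ch) (j : Int) with
            | none => rfl
            | some t => simp [List.replicate_succ' (n := n)]
      · have hne : (some c : Option Char) ≠ some ch := by simp [h]
        have hs : stepB [(c, n)] ch = [(c, n)] ++ [(ch, 1)] := by simp [stepB, h]
        have hcast : (j : Int) + 1 = ((j + 1 : Nat) : Int) := by push_cast; ring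
        rw [hs, foldl_stepB_front]
        simp only [List.singleton_append, emitB]
        rw [goA_cons_new ch rest [] (some c) (j : Int) hne, hcast]
        cases hg : PySem.List.pyGet? pvUpper (j : Int) with
        | none => rfl
        | some a =>
            simp only [Option.bind_some]
            rw [ih]
            cases hg2 : PySem.List.pyGet? pvUpper ((j + 1 : Nat) : Int) with
            | none => rfl
            | some b =>
                simp only [Option.bind_some]
                rw [goA_acc rest ([] ++ [b]) (some ch) ((j + 1 : Nat) : Int)]
                cases goA rest [] (some ch) ((j + 1 : Nat) : Int) <;> simp

-- ===== VERDICT (by name: the statement is the Claim_ definition above) =====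
theorem get_word_pattern_spec : Claim_equal_get_word_pattern := by
  intro word _ _
  unfold Spec_get_word_pattern get_word_pattern get_word_pattern_alt
  cases hw : word.toList with
  | nil => simp [goA, emitB]
  | cons ch rest =>
      simp only [List.foldl_cons, show stepB [] ch = [(ch, 1)] from by simp [stepB]]
      rw [main_inv rest ch 1 0]
      simp only [goA, if_pos (by simp : (none : Option Char) ≠ some ch),
        show (-1 : Int) + 1 = ((0 : Nat) : Int) by norm_num]
      cases hg : PySem.List.pyGet? pvUpper ((0 : Nat) : Int) with
      | none => simp
      | some a =>
          dsimp only
          rw [goA_acc]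
          cases goA rest [] (some ch) ((0 : Nat) : Int) <;> simp
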